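-- pv_equiv track=rewrite | github.com/sanggur591/coding-test-boj-progs | 프로그래머스/lv2/77885. 2개 이하로 다른 비트/2개 이하로 다른 비트.py | solution
-- ===== SOURCE A (Python) =====
-- def solution(numbers):
--     a = []
--     for num in numbers :
--         answer = 0
--         bin_num = bin(num)
--         x = bin_num[2:]
--
--         if len(x) == x.count("1") :
--             answer = num + (num+1)//2
--
--         elif x[len(x)-1] == '0' :
--             answer = num +1
--
--         else:
--             for i in range(0,len(x)) :
--                     if x[len(x)-1-i]=='0':
--                         answer = num + 2 ** (i-1)
--                         break
--
--
--         a.append(answer)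
--
--     return a
-- ===== SOURCE B (Python) =====
-- def solution(numbers):
--     out = []
--     for num in numbers:
--         y = (~num) & (num + 1)      # lowest unset bit
--         out.append(num + y - (y >> 1))
--     return out
-- ===== Notes on version B (the rewrite author's own statement) =====
-- stated objective: simpler
-- what changed: Replaces A's bin()-string construction, slicing, count/last-digit branching and per-number digit-scan loop with a closed-form lowest-unset-bit computation ((~n)&(n+1)) in pure integer arithmetic; Pre_ excludes lists containing a negative odd number, outside the problem's natural domain of non-negative integers, where A's value is an accident of scanning the digits of bin()'s '-0b'-prefixed absolute value.
-- outside the precondition, e.g. on solution([-3]): A returns [0], B returns [-2]; on solution([-1]): A returns [0], B returns [-1]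
import Mathlib
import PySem

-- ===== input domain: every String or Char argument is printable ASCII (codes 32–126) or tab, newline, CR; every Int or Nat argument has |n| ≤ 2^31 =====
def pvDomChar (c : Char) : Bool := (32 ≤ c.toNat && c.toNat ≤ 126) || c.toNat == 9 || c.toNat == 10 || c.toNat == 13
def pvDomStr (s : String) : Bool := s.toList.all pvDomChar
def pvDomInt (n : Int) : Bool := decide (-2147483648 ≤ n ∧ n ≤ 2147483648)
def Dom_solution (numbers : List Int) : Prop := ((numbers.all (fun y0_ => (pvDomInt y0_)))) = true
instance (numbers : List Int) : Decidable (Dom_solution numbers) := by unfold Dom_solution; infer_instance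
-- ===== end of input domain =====

-- B replaces A's bin()-string branching and bit-scan loop with closed-form lowest-unset-bit arithmetic (objective: simpler); Pre_ excludes lists containing a negative odd number (outside the problem's natural domain).


-- ===== PORT A =====
-- binary digits of m, most significant first ([] for 0); hand port of the digit part
-- of Python's bin() (exact: bin lists the binary digits of abs(m) MSB-first)
def bitsChars (m : Nat) : List Char :=
  if h : m = 0 then []
  else bitsChars (m / 2) ++ [if m % 2 = 1 then '1' else '0']
termination_by m
decreasing_by exact Nat.div_lt_self (Nat.pos_of_ne_zero h) (by omega)

-- hand port of Python's bin(num) as its character list ("0b…" / "-0b…"); exact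
def pyBinChars (num : Int) : List Char :=
  (if num < 0 then ['-', '0', 'b'] else ['0', 'b'])
    ++ (if num = 0 then ['0'] else bitsChars num.natAbs)

-- the inner 'for i in range(0, len(x)): if x[len(x)-1-i]=="0": answer = num + 2**(i-1); break'
-- (falls through with answer = 0 when no '0' is found).
def loopA (x : List Char) (num : Int) (n : Nat) (i : Nat) : Int :=
  if _h : i < n then
    if PySem.List.pyGet? x ((x.length : Int) - 1 - i) = some '0' then num + 2 ^ (i - 1)
    else loopA x num n (i + 1)
  else 0
termination_by n - i

-- the body of A's outer loop for one num
def stepA (num : Int) : Int :=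
  let x := (pyBinChars num).drop 2   -- bin_num[2:] (slice from a nonnegative index = drop)
  if x.length = x.count '1' then num + PySem.Int.floordiv (num + 1) 2
  else if PySem.List.pyGet? x ((x.length : Int) - 1) = some '0' then num + 1
  else loopA x num x.length 0

def solution (numbers : List Int) : List Int :=
  numbers.foldl (fun a num => a ++ [stepA num]) []

-- ===== PORT B =====
-- Source B's loop body: closed-form lowest-unset-bit arithmetic
-- (Python's ~, &, >> are Int.not, PySem.Int.band, >>> per the PySem prelude)
def nextBigger (num : Int) : Int :=
  let y := PySem.Int.band (Int.not num) (num + 1)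
  num + y - (y >>> (1 : Nat))

def solution_alt (numbers : List Int) : List Int :=
  numbers.map nextBigger

-- ===== PRECONDITION & SPEC =====
-- Pre_ excludes lists containing a negative odd number, outside the problem's natural domain
-- of non-negative integers; there A's value is an accident of scanning the digits of bin()'s
-- '-0b'-prefixed absolute value, which B does not reproduce.
def Pre_solution (numbers : List Int) : Prop := ∀ n ∈ numbers, 0 ≤ n ∨ n % 2 = 0
instance (numbers : List Int) : Decidable (Pre_solution numbers) := by unfold Pre_solution; infer_instance

def pvWitness_solution : List Int := [0, 1, 2, 7, 8, 11]

def Spec_solution (numbers : List Int) (out : List Int) : Prop := out = solution_alt numbers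
instance (numbers : List Int) (out : List Int) : Decidable (Spec_solution numbers out) := by unfold Spec_solution; infer_instance

-- ===== CLAIM =====
def Claim_equal_solution : Prop := ∀ (numbers : List Int), Dom_solution numbers → Pre_solution numbers → Spec_solution numbers (solution numbers)

-- ===== LEMMAS AND PROOFS =====

-- number of trailing one-bits of m
def lz (m : Nat) : Nat :=
  if h : m % 2 = 1 then lz (m / 2) + 1 else 0
termination_by m
decreasing_by exact Nat.div_lt_self (by omega) (by omega)

theorem bits_zero : bitsChars 0 = [] := by rw [bitsChars]; simp

theorem bits_succ {m : Nat} (h : m ≠ 0) :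
    bitsChars m = bitsChars (m / 2) ++ [if m % 2 = 1 then '1' else '0'] := by
  conv_lhs => rw [bitsChars]
  simp [h]

theorem len_bits_pos {m : Nat} (h : m ≠ 0) : 0 < (bitsChars m).length := by
  rw [bits_succ h]; simp

-- the i-th digit from the end of bitsChars m is bit i of m
theorem bits_get : ∀ (i m : Nat), i < (bitsChars m).length →
    (bitsChars m)[(bitsChars m).length - 1 - i]? =
      some (if m / 2 ^ i % 2 = 1 then '1' else '0') := by
  intro i
  induction i with
  | zero =>
    intro m hi
    have h : m ≠ 0 := by
      intro h; subst h; simp [bits_zero] at hi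
    rw [bits_succ h]
    simp only [List.length_append, List.length_singleton, Nat.sub_zero, Nat.add_sub_cancel]
    rw [List.getElem?_append_right (by omega)]
    simp
  | succ i ih =>
    intro m hi
    have h : m ≠ 0 := by
      intro h; subst h; simp [bits_zero] at hi
    have hlen : (bitsChars m).length = (bitsChars (m / 2)).length + 1 := by
      rw [bits_succ h]; simp
    have hi2 : i < (bitsChars (m / 2)).length := by omega
    conv_lhs => rw [bits_succ h]
    rw [List.getElem?_append_left (by simp only [List.length_append, List.length_singleton]; omega)]
    simp only [List.length_append, List.length_singleton]
    have : (bitsChars (m / 2)).length + 1 - 1 - (i + 1) = (bitsChars (m / 2)).length - 1 - i := by omega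
    rw [this, ih (m / 2) hi2]
    congr 1
    have : m / 2 ^ (i + 1) = m / 2 / 2 ^ i := by
      rw [Nat.div_div_eq_div_mul, pow_succ, Nat.mul_comm]
    rw [this]

theorem allones_iff : ∀ m : Nat, m ≠ 0 →
    ((bitsChars m).all (fun c => c = '1') ↔ m + 1 = 2 ^ (bitsChars m).length) := by
  intro m
  induction m using Nat.strong_induction_on with
  | _ m ih =>
    intro h
    rw [bits_succ h]
    simp only [List.all_append, List.all_cons, List.all_nil, Bool.and_true, Bool.and_eq_true,
      List.length_append, List.length_singleton]
    by_cases h2 : m / 2 = 0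
    · rw [h2, bits_zero]
      simp only [List.all_nil, true_and, List.length_nil, Nat.zero_add, pow_one]
      constructor
      · intro hc
        have : m % 2 = 1 := by
          by_contra hm
          simp [hm] at hc
        omega
      · intro hm
        have : m = 1 := by omega
        simp [this]
    · have hrec := ih (m / 2) (Nat.div_lt_self (Nat.pos_of_ne_zero h) (by omega)) h2
      constructor
      · rintro ⟨h1, hc⟩
        have hm : m % 2 = 1 := by
          by_contra hm
          simp [hm] at hc
        have := hrec.mp h1
        have hpow : 2 ^ ((bitsChars (m / 2)).length + 1) = 2 * 2 ^ (bitsChars (m / 2)).length := by ring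
        omega
      · intro hpow
        have hm : m % 2 = 1 := by
          have h1 : 0 < (bitsChars (m / 2)).length := len_bits_pos h2
          have : 2 ^ ((bitsChars (m / 2)).length + 1) % 2 = 0 := by
            have : ∃ k, (bitsChars (m / 2)).length + 1 = k + 1 := ⟨_, rfl⟩
            obtain ⟨k, hk⟩ := this
            rw [hk, pow_succ]; omega
          omega
        refine ⟨hrec.mpr ?_, by simp [hm]⟩
        have hpow2 : 2 ^ ((bitsChars (m / 2)).length + 1) = 2 * 2 ^ (bitsChars (m / 2)).length := by ring
        omega

theorem lz_of_even {m : Nat} (h : m % 2 ≠ 1) : lz m = 0 := by rw [lz]; simp [h]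

theorem lz_of_odd {m : Nat} (h : m % 2 = 1) : lz m = lz (m / 2) + 1 := by rw [lz]; simp [h]

theorem lz_one : ∀ (j m : Nat), j < lz m → m / 2 ^ j % 2 = 1 := by
  intro j
  induction j with
  | zero =>
    intro m hj
    by_contra hm
    rw [lz_of_even (by simpa using hm)] at hj
    omega
  | succ j ih =>
    intro m hj
    have hm : m % 2 = 1 := by
      by_contra hm
      rw [lz_of_even hm] at hj; omega
    rw [lz_of_odd hm] at hj
    have h2 := ih (m / 2) (by omega)
    rw [Nat.div_div_eq_div_mul] at h2
    have h3 : 2 ^ (j + 1) = 2 * 2 ^ j := by ring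
    rw [h3]
    exact h2

theorem lz_two : ∀ m : Nat, m / 2 ^ lz m % 2 = 0 := by
  intro m
  induction m using Nat.strong_induction_on with
  | _ m ih =>
    by_cases hm : m % 2 = 1
    · rw [lz_of_odd hm]
      have h2 := ih (m / 2) (Nat.div_lt_self (by omega) (by omega))
      rw [Nat.div_div_eq_div_mul] at h2
      have h3 : 2 ^ (lz (m / 2) + 1) = 2 * 2 ^ lz (m / 2) := by ring
      rw [h3]
      exact h2
    · rw [lz_of_even hm]
      simpa using hm

theorem lz_pow_sub_one : ∀ L : Nat, lz (2 ^ L - 1) = L := by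
  intro L
  induction L with
  | zero => simp [lz_of_even]
  | succ L ih =>
    have h1 : 1 ≤ 2 ^ L := Nat.one_le_two_pow
    have hodd : (2 ^ (L + 1) - 1) % 2 = 1 := by
      rw [pow_succ]; omega
    rw [lz_of_odd hodd]
    have : (2 ^ (L + 1) - 1) / 2 = 2 ^ L - 1 := by rw [pow_succ]; omega
    rw [this, ih]

-- tN m = (m+1) - ((m+1) &&& m): the value of Python's (~m)&(m+1) for m ≥ 0
def tN (m : Nat) : Nat := (m + 1) - ((m + 1) &&& m)

theorem land_succ_self_even {m : Nat} (h : m % 2 = 0) : (m + 1) &&& m = m := by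
  apply Nat.eq_of_testBit_eq
  intro i
  cases i with
  | zero =>
    simp only [Nat.testBit_land, Nat.testBit_zero]
    have : ¬ m % 2 = 1 := by omega
    simp [this]
  | succ i =>
    rw [Nat.testBit_land, Nat.testBit_add_one, Nat.testBit_add_one]
    have : (m + 1) / 2 = m / 2 := by omega
    rw [this, Bool.and_self]

theorem land_succ_self_odd {m : Nat} (h : m % 2 = 1) :
    (m + 1) &&& m = 2 * ((m / 2 + 1) &&& (m / 2)) := by
  apply Nat.eq_of_testBit_eq
  intro i
  cases i with
  | zero =>
    simp only [Nat.testBit_land, Nat.testBit_zero]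
    have h1 : ¬ (m + 1) % 2 = 1 := by omega
    have h2 : ¬ 2 * ((m / 2 + 1) &&& (m / 2)) % 2 = 1 := by omega
    simp [h1, h2]
  | succ i =>
    rw [Nat.testBit_land, Nat.testBit_add_one, Nat.testBit_add_one, Nat.testBit_add_one]
    have h1 : (m + 1) / 2 = m / 2 + 1 := by omega
    have h2 : 2 * ((m / 2 + 1) &&& (m / 2)) / 2 = (m / 2 + 1) &&& (m / 2) := by omega
    rw [h1, h2, ← Nat.testBit_land]

theorem land_succ_le (m : Nat) : (m + 1) &&& m ≤ m + 1 := Nat.and_le_left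

theorem tN_eq_pow_lz : ∀ m : Nat, tN m = 2 ^ lz m := by
  intro m
  induction m using Nat.strong_induction_on with
  | _ m ih =>
    by_cases hm : m % 2 = 1
    · have := ih (m / 2) (Nat.div_lt_self (by omega) (by omega))
      unfold tN at *
      rw [land_succ_self_odd hm, lz_of_odd hm, pow_succ]
      have hle : (m / 2 + 1) &&& (m / 2) ≤ m / 2 + 1 := land_succ_le (m / 2)
      omega
    · unfold tN
      rw [land_succ_self_even (by omega), lz_of_even hm]
      omega

-- Python's ~n
theorem int_not_eq (n : Int) : Int.not n = -n - 1 := by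
  cases n with
  | ofNat k => simp [Int.not, Int.negSucc_eq]; omega
  | negSucc k => simp [Int.not, Int.negSucc_eq]

-- (~m) & (m+1) for a nonnegative m is tN m
theorem band_not_succ_natCast (m : Nat) :
    PySem.Int.band (Int.not (m : Int)) ((m : Int) + 1) = (tN m : Int) := by
  rw [int_not_eq]
  unfold PySem.Int.band tN
  have h1 : ¬ (0 : Int) ≤ -(m : Int) - 1 := by omega
  have h2 : (0 : Int) ≤ (m : Int) + 1 := by omega
  simp only [h1, h2, if_true, if_false]
  have h3 : ((m : Int) + 1).toNat = m + 1 := by omega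
  have h4 : (-(-(m : Int) - 1) - 1).toNat = m := by omega
  rw [h3, h4]

-- (t : Int) >> 1 = t / 2
theorem shiftRight_one_natCast (t : Nat) : ((t : Int) >>> (1 : Nat)) = ((t / 2 : Nat) : Int) := by
  show Int.shiftRight (Int.ofNat t) 1 = _
  simp [Int.shiftRight, Nat.shiftRight_one]

-- the scan loop: first '0' (scanning from the end) at from-end position k
theorem loopA_found (x : List Char) (num : Int) (k : Nat) (hk : k < x.length)
    (h0 : PySem.List.pyGet? x ((x.length : Int) - 1 - k) = some '0')
    (h1 : ∀ j : Nat, j < k → PySem.List.pyGet? x ((x.length : Int) - 1 - j) ≠ some '0') :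
    ∀ i : Nat, i ≤ k → loopA x num x.length i = num + 2 ^ (k - 1) := by
  intro i hik
  induction hd : k - i generalizing i with
  | zero =>
    have : i = k := by omega
    subst this
    rw [loopA]
    simp only [hk, dif_pos, h0, if_pos]
  | succ d ihd =>
    have hik2 : i < k := by omega
    rw [loopA]
    have hi : i < x.length := by omega
    rw [dif_pos hi, if_neg (h1 i hik2)]
    exact ihd (i + 1) (by omega) (by omega)

-- pyGet? at an in-range backwards index is getElem?
theorem pyGet_back (x : List Char) (j : Nat) (hj : j < x.length) :
    PySem.List.pyGet? x ((x.length : Int) - 1 - j) = x[x.length - 1 - j]? := by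
  have : ((x.length : Int) - 1 - j) = ((x.length - 1 - j : Nat) : Int) := by
    push_cast; omega
  rw [this, PySem.List.pyGet?_natCast]

theorem lz_lt_len (m : Nat) (hm : m ≠ 0)
    (hnall : ¬ (bitsChars m).all (fun c => c = '1') = true) :
    lz m < (bitsChars m).length := by
  by_contra hc
  apply hnall
  rw [List.all_eq_true]
  intro c hcmem
  obtain ⟨j, hj, hcj⟩ := List.mem_iff_getElem.mp hcmem
  have hlt : (bitsChars m).length - 1 - j < (bitsChars m).length := by omega
  have hdig := bits_get ((bitsChars m).length - 1 - j) m hlt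
  have hidx : (bitsChars m).length - 1 - ((bitsChars m).length - 1 - j) = j := by omega
  rw [hidx] at hdig
  have h1 : m / 2 ^ ((bitsChars m).length - 1 - j) % 2 = 1 :=
    lz_one _ m (by omega)
  rw [h1] at hdig
  simp only [if_pos rfl] at hdig
  rw [List.getElem?_eq_getElem hj] at hdig
  simp only [Option.some.injEq] at hdig
  simp [← hcj, hdig]

-- A's per-element value equals B's on a non-negative or even num
theorem key_step (num : Int) (hnn : 0 ≤ num ∨ num % 2 = 0) : stepA num = nextBigger num := by
  cases num with
  | negSucc k =>
    -- an even negative num: both sides are num + 1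
    have hkodd : k % 2 = 1 := by
      rcases hnn with h | h
      · exact absurd h (by rw [Int.negSucc_eq]; omega)
      · rw [Int.negSucc_eq] at h; omega
    have hm0 : k + 1 ≠ 0 := by omega
    have hx : (pyBinChars (Int.negSucc k)).drop 2 = 'b' :: bitsChars (k + 1) := by
      unfold pyBinChars
      rw [if_pos (by omega : Int.negSucc k < 0), if_neg (by omega : ¬ (Int.negSucc k = 0))]
      simp [Int.natAbs_negSucc]
    have hstep : stepA (Int.negSucc k) =
        (if ('b' :: bitsChars (k + 1)).length = ('b' :: bitsChars (k + 1)).count '1' then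
          Int.negSucc k + PySem.Int.floordiv (Int.negSucc k + 1) 2
        else if PySem.List.pyGet? ('b' :: bitsChars (k + 1)) ((('b' :: bitsChars (k + 1)).length : Int) - 1) = some '0' then
          Int.negSucc k + 1
        else loopA ('b' :: bitsChars (k + 1)) (Int.negSucc k) ('b' :: bitsChars (k + 1)).length 0) := by
      simp only [stepA]
      rw [hx]
    have hcount : ¬ ('b' :: bitsChars (k + 1)).length = ('b' :: bitsChars (k + 1)).count '1' := by
      have h1 : ('b' :: bitsChars (k + 1)).count '1' = (bitsChars (k + 1)).count '1' := by
        rw [List.count_cons]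
        simp
      have h2 : (bitsChars (k + 1)).count '1' ≤ (bitsChars (k + 1)).length := List.count_le_length
      simp only [List.length_cons, h1]
      omega
    have hlast : PySem.List.pyGet? ('b' :: bitsChars (k + 1)) ((('b' :: bitsChars (k + 1)).length : Int) - 1) =
        some (if (k + 1) % 2 = 1 then '1' else '0') := by
      have hlen : 0 < (bitsChars (k + 1)).length := len_bits_pos hm0
      have hb := pyGet_back ('b' :: bitsChars (k + 1)) 0 (by simp)
      simp only [Nat.cast_zero, sub_zero] at hb
      rw [hb]
      simp only [List.length_cons, Nat.sub_zero, Nat.add_sub_cancel]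
      obtain ⟨c, hc⟩ : ∃ c, (bitsChars (k + 1)).length = c + 1 := ⟨_, (Nat.succ_pred_eq_of_pos hlen).symm⟩
      rw [show (bitsChars (k + 1)).length = c + 1 from hc, List.getElem?_cons_succ]
      have := bits_get 0 (k + 1) (by omega)
      simp only [Nat.sub_zero, pow_zero, Nat.div_one, hc, Nat.add_sub_cancel] at this
      exact this
    have h2 : ¬ (k + 1) % 2 = 1 := by omega
    rw [hstep, if_neg hcount, hlast, if_neg h2, if_pos rfl]
    -- B side: y = 1
    have hband : PySem.Int.band (Int.not (Int.negSucc k)) (Int.negSucc k + 1) = 1 := by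
      rw [int_not_eq]
      unfold PySem.Int.band
      rw [Int.negSucc_eq]
      have ha : (0 : Int) ≤ -(-((k : Int) + 1)) - 1 := by omega
      have hb : ¬ (0 : Int) ≤ -((k : Int) + 1) + 1 := by omega
      rw [if_pos ha, if_neg hb]
      have h3 : (-(-((k : Int) + 1)) - 1).toNat = k := by omega
      have h4 : (-(-((k : Int) + 1) + 1) - 1).toNat = k - 1 := by omega
      rw [h3, h4]
      have h5 : k - (k &&& (k - 1)) = tN (k - 1) := by
        unfold tN
        have : k - 1 + 1 = k := by omega
        rw [this]
      rw [h5, tN_eq_pow_lz, lz_of_even (by omega : ¬ (k - 1) % 2 = 1)]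
      simp
    simp only [nextBigger, hband]
    rw [show ((1 : Int) >>> (1 : Nat)) = 0 from by decide]
    simp
  | ofNat m =>
  show stepA ((m : Nat) : Int) = nextBigger ((m : Nat) : Int)
  by_cases hm0 : m = 0
  · subst hm0; decide
  · have hneg : ¬ ((m : Int) < 0) := by omega
    have hz : ¬ ((m : Int) = 0) := by omega
    have hx : (pyBinChars (m : Int)).drop 2 = bitsChars m := by
      unfold pyBinChars
      rw [if_neg hneg, if_neg hz]
      simp
    have hstep : stepA (m : Int) =
        (if (bitsChars m).length = (bitsChars m).count '1' then
          (m : Int) + PySem.Int.floordiv ((m : Int) + 1) 2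
        else if PySem.List.pyGet? (bitsChars m) (((bitsChars m).length : Int) - 1) = some '0' then
          (m : Int) + 1
        else loopA (bitsChars m) (m : Int) (bitsChars m).length 0) := by
      simp only [stepA]
      rw [hx]
    have hnb : nextBigger (m : Int) = (m : Int) + ((2 ^ lz m : Nat) : Int) - ((2 ^ lz m / 2 : Nat) : Int) := by
      simp only [nextBigger]
      rw [band_not_succ_natCast, tN_eq_pow_lz, shiftRight_one_natCast]
    rw [hstep, hnb]
    have hL : 0 < (bitsChars m).length := len_bits_pos hm0
    by_cases hall : (bitsChars m).length = (bitsChars m).count '1'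
    · -- all digits '1': m + 1 = 2^L, lz m = L
      rw [if_pos hall]
      have hallc : (bitsChars m).all (fun c => c = '1') = true := by
        rw [List.all_eq_true]
        have := (List.count_eq_length (a := '1') (l := bitsChars m)).mp hall.symm
        intro c hc
        simp [(this c hc).symm]
      have hpow := (allones_iff m hm0).mp hallc
      have hlz : lz m = (bitsChars m).length := by
        have h2 : m = 2 ^ (bitsChars m).length - 1 := by omega
        conv_lhs => rw [h2]
        exact lz_pow_sub_one _
      have hfd : PySem.Int.floordiv ((m : Int) + 1) 2 = (((m + 1) / 2 : Nat) : Int) := by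
        have := PySem.Int.floordiv_natCast (m + 1) 2
        push_cast at this ⊢
        exact this
      rw [hfd, hlz, ← hpow]
      have heven : (m + 1) % 2 = 0 := by
        have : ∃ j, (bitsChars m).length = j + 1 := ⟨_, (Nat.succ_pred_eq_of_pos hL).symm⟩
        obtain ⟨j, hj⟩ := this
        rw [hj, pow_succ] at hpow
        omega
      push_cast
      omega
    · rw [if_neg hall]
      have hnallc : ¬ (bitsChars m).all (fun c => c = '1') = true := by
        intro hac
        apply hall
        rw [List.all_eq_true] at hac
        exact ((List.count_eq_length (a := '1') (l := bitsChars m)).mpr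
          (fun c hc => ((by simpa using hac c hc : c = '1')).symm)).symm
      have hlast : PySem.List.pyGet? (bitsChars m) (((bitsChars m).length : Int) - 1) =
          some (if m % 2 = 1 then '1' else '0') := by
        have h0 := bits_get 0 m (by omega)
        have := pyGet_back (bitsChars m) 0 (by omega)
        simp only [Nat.cast_zero, sub_zero] at this
        rw [this, h0]
        simp
      by_cases hev : m % 2 = 0
      · have hm1 : ¬ m % 2 = 1 := by omega
        rw [hlast]
        rw [if_neg hm1] at *
        rw [if_pos rfl]
        rw [lz_of_even hm1]
        norm_num
      · have hodd : m % 2 = 1 := by omega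
        rw [hlast, if_pos hodd]
        rw [if_neg (by decide : ¬ (some '1' = some '0'))]
        have hlzlt : lz m < (bitsChars m).length := lz_lt_len m hm0 hnallc
        have hlz1 : 1 ≤ lz m := by rw [lz_of_odd hodd]; omega
        have h0 : PySem.List.pyGet? (bitsChars m) (((bitsChars m).length : Int) - 1 - (lz m : Nat)) = some '0' := by
          rw [pyGet_back (bitsChars m) (lz m) hlzlt]
          rw [bits_get (lz m) m hlzlt]
          simp [lz_two m]
        have h1 : ∀ j : Nat, j < lz m →
            PySem.List.pyGet? (bitsChars m) (((bitsChars m).length : Int) - 1 - (j : Nat)) ≠ some '0' := by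
          intro j hj
          rw [pyGet_back (bitsChars m) j (by omega)]
          rw [bits_get j m (by omega)]
          rw [lz_one j m hj]
          simp
        rw [loopA_found (bitsChars m) (m : Int) (lz m) hlzlt h0 h1 0 (by omega)]
        obtain ⟨a, ha⟩ : ∃ a, lz m = a + 1 := ⟨lz m - 1, by omega⟩
        rw [ha]
        simp only [Nat.add_sub_cancel, pow_succ]
        have : (2 ^ a * 2) / 2 = 2 ^ a := by omega
        rw [this]
        push_cast
        ring

-- ===== VERDICT =====
theorem solution_spec : Claim_equal_solution := by
  intro numbers _ hpre
  unfold Spec_solution solution solution_alt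
  rw [PySem.List.foldl_append_singleton_eq_map]
  exact List.map_congr_left (fun num hmem => key_step num (hpre num hmem))
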